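-- pv_equiv track=rewrite | github.com/dongVu1105/chessVer2 | chess_ai.py | evaluate_passed_pawns
-- ===== SOURCE A (Python) =====
-- def evaluate_passed_pawns(game_state, white_pawns, black_pawns):
--     """Đánh giá Tốt thông."""
--     score = 0
--     # Tốt trắng
--     for p_row, p_col in white_pawns:
--         is_passed = True
--         for b_row, b_col in black_pawns:
--             if b_col >= p_col - 1 and b_col <= p_col + 1 and b_row < p_row:
--                 is_passed = False
--                 break
--         if is_passed:
--             passed_pawn_bonus = (7 - p_row) * 10
--             score += passed_pawn_bonus
--
--     # Tốt đen
--     for p_row, p_col in black_pawns: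
--         is_passed = True
--         for w_row, w_col in white_pawns:
--             if w_col >= p_col - 1 and w_col <= p_col + 1 and w_row > p_row:
--                 is_passed = False
--                 break
--         if is_passed:
--             passed_pawn_bonus = p_row * 10
--             score -= passed_pawn_bonus
--
--     return score
-- ===== SOURCE B (Python) =====
-- def evaluate_passed_pawns(game_state, white_pawns, black_pawns):
--     """Passed-pawn scoring via per-column indexes of the enemy pawns."""
--     min_black_row = {}
--     for b_row, b_col in black_pawns:
--         if b_col in min_black_row:
--             min_black_row[b_col] = min(min_black_row[b_col], b_row)
--         else:
--             min_black_row[b_col] = b_row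
--     max_white_row = {}
--     for w_row, w_col in white_pawns:
--         if w_col in max_white_row:
--             max_white_row[w_col] = max(max_white_row[w_col], w_row)
--         else:
--             max_white_row[w_col] = w_row
--
--     score = 0
--     for p_row, p_col in white_pawns:
--         if not any(c in min_black_row and min_black_row[c] < p_row
--                    for c in (p_col - 1, p_col, p_col + 1)):
--             score += (7 - p_row) * 10
--     for p_row, p_col in black_pawns:
--         if not any(c in max_white_row and max_white_row[c] > p_row
--                    for c in (p_col - 1, p_col, p_col + 1)):
--             score -= p_row * 10
--     return score
-- ===== Notes on version B (the rewrite author's own statement) =====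
-- stated objective: faster
-- what changed: B indexes each side's pawns by column once (min black row / max white row per column) and tests only the three neighbouring columns per pawn, instead of rescanning the whole enemy pawn list for every pawn.
import Mathlib
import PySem

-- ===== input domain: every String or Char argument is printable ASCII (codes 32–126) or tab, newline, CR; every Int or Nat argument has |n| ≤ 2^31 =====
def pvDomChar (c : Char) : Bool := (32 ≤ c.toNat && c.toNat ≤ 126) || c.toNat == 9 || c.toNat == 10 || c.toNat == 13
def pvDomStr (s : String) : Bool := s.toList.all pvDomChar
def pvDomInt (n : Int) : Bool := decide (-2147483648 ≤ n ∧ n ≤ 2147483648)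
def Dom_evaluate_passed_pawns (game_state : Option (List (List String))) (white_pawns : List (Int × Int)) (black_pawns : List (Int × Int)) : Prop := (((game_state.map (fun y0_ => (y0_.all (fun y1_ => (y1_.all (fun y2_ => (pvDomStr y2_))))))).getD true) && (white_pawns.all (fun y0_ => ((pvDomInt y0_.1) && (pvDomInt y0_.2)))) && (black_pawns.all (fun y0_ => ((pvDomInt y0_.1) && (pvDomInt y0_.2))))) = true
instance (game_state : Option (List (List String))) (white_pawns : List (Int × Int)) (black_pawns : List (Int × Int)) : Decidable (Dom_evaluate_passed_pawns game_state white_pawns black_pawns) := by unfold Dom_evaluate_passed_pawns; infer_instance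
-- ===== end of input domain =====

-- B replaces A's per-pawn rescan of the whole enemy pawn list by two per-column
-- dictionaries built once (min black row / max white row per column); objective: faster.

-- ===== PORT A =====
-- inner 'for … break' loop setting is_passed ported as List.any over the same predicate
def evaluate_passed_pawns (game_state : Option (List (List String))) (white_pawns : List (Int × Int)) (black_pawns : List (Int × Int)) : Int :=
  let score : Int := white_pawns.foldl (fun score p =>
    let is_passed := !(black_pawns.any (fun b =>
      decide (b.2 ≥ p.2 - 1) && decide (b.2 ≤ p.2 + 1) && decide (b.1 < p.1)))
    if is_passed then score + (7 - p.1) * 10 else score) 0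
  black_pawns.foldl (fun score p =>
    let is_passed := !(white_pawns.any (fun w =>
      decide (w.2 ≥ p.2 - 1) && decide (w.2 ≤ p.2 + 1) && decide (w.1 > p.1)))
    if is_passed then score - p.1 * 10 else score) score

-- ===== PORT B =====
-- dict-building loops of Source B ('if col in dict: keep min/max else store row')
def pvStepMin (d : PySem.Dict Int Int) (q : Int × Int) : PySem.Dict Int Int :=
  match d.get? q.2 with
  | some m => d.insert q.2 (min m q.1)
  | none   => d.insert q.2 q.1

def pvStepMax (d : PySem.Dict Int Int) (q : Int × Int) : PySem.Dict Int Int :=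
  match d.get? q.2 with
  | some m => d.insert q.2 (max m q.1)
  | none   => d.insert q.2 q.1

-- 'c in dict and dict[c] < r' / '… > r'
def pvLtAt (d : PySem.Dict Int Int) (c r : Int) : Bool :=
  match d.get? c with
  | some m => decide (m < r)
  | none   => false

def pvGtAt (d : PySem.Dict Int Int) (c r : Int) : Bool :=
  match d.get? c with
  | some m => decide (m > r)
  | none   => false

def evaluate_passed_pawns_alt (game_state : Option (List (List String))) (white_pawns : List (Int × Int)) (black_pawns : List (Int × Int)) : Int :=
  let min_black_row := black_pawns.foldl pvStepMin PySem.Dict.empty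
  let max_white_row := white_pawns.foldl pvStepMax PySem.Dict.empty
  let score : Int := white_pawns.foldl (fun score p =>
    if !([p.2 - 1, p.2, p.2 + 1].any (fun c => pvLtAt min_black_row c p.1))
    then score + (7 - p.1) * 10 else score) 0
  black_pawns.foldl (fun score p =>
    if !([p.2 - 1, p.2, p.2 + 1].any (fun c => pvGtAt max_white_row c p.1))
    then score - p.1 * 10 else score) score

-- ===== PRECONDITION & SPEC =====
def Spec_evaluate_passed_pawns (game_state : Option (List (List String))) (white_pawns : List (Int × Int)) (black_pawns : List (Int × Int)) (out : Int) : Prop := out = evaluate_passed_pawns_alt game_state white_pawns black_pawns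
instance (game_state : Option (List (List String))) (white_pawns : List (Int × Int)) (black_pawns : List (Int × Int)) (out : Int) : Decidable (Spec_evaluate_passed_pawns game_state white_pawns black_pawns out) := by unfold Spec_evaluate_passed_pawns; infer_instance

-- ===== CLAIM (what is proved, stated in full; the proofs are below) =====
def Claim_equal_evaluate_passed_pawns : Prop := ∀ (game_state : Option (List (List String))) (white_pawns : List (Int × Int)) (black_pawns : List (Int × Int)), Dom_evaluate_passed_pawns game_state white_pawns black_pawns → Spec_evaluate_passed_pawns game_state white_pawns black_pawns (evaluate_passed_pawns game_state white_pawns black_pawns)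

-- ===== LEMMAS AND PROOFS =====

-- the min-fold dictionary records, per column, exactly whether some pawn in that column has row < r
theorem pvLtAt_foldl (bp : List (Int × Int)) (d : PySem.Dict Int Int) (c r : Int) :
    pvLtAt (bp.foldl pvStepMin d) c r = true ↔
    pvLtAt d c r = true ∨ ∃ q ∈ bp, q.2 = c ∧ q.1 < r := by
  induction bp generalizing d with
  | nil => simp
  | cons a t ih =>
    simp only [List.foldl_cons, ih, List.mem_cons]
    have hstep : (pvLtAt (pvStepMin d a) c r = true) ↔
        (pvLtAt d c r = true ∨ (a.2 = c ∧ a.1 < r)) := by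
      unfold pvStepMin pvLtAt
      by_cases hc : c = a.2
      · subst hc
        cases h : d.get? a.2 with
        | none => simp only [PySem.Dict.get?_insert_self]; simp
        | some m => simp only [PySem.Dict.get?_insert_self]; simp
      · have hc' : ¬ a.2 = c := fun e => hc e.symm
        cases h : d.get? a.2 with
        | none => rw [PySem.Dict.get?_insert_of_ne _ _ hc]; simp [hc']
        | some m => rw [PySem.Dict.get?_insert_of_ne _ _ hc]; simp [hc']
    rw [hstep]
    constructor
    · rintro ((h | h) | ⟨q, hq, hh⟩)
      · exact Or.inl h
      · exact Or.inr ⟨a, Or.inl rfl, h.1, h.2⟩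
      · exact Or.inr ⟨q, Or.inr hq, hh⟩
    · rintro (h | ⟨q, (rfl | hq), hh⟩)
      · exact Or.inl (Or.inl h)
      · exact Or.inl (Or.inr hh)
      · exact Or.inr ⟨q, hq, hh⟩

theorem pvGtAt_foldl (wp : List (Int × Int)) (d : PySem.Dict Int Int) (c r : Int) :
    pvGtAt (wp.foldl pvStepMax d) c r = true ↔
    pvGtAt d c r = true ∨ ∃ q ∈ wp, q.2 = c ∧ q.1 > r := by
  induction wp generalizing d with
  | nil => simp
  | cons a t ih =>
    simp only [List.foldl_cons, ih, List.mem_cons]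
    have hstep : (pvGtAt (pvStepMax d a) c r = true) ↔
        (pvGtAt d c r = true ∨ (a.2 = c ∧ a.1 > r)) := by
      unfold pvStepMax pvGtAt
      by_cases hc : c = a.2
      · subst hc
        cases h : d.get? a.2 with
        | none => simp only [PySem.Dict.get?_insert_self]; simp
        | some m => simp only [PySem.Dict.get?_insert_self]; simp
      · have hc' : ¬ a.2 = c := fun e => hc e.symm
        cases h : d.get? a.2 with
        | none => rw [PySem.Dict.get?_insert_of_ne _ _ hc]; simp [hc']
        | some m => rw [PySem.Dict.get?_insert_of_ne _ _ hc]; simp [hc']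
    rw [hstep]
    constructor
    · rintro ((h | h) | ⟨q, hq, hh⟩)
      · exact Or.inl h
      · exact Or.inr ⟨a, Or.inl rfl, h.1, h.2⟩
      · exact Or.inr ⟨q, Or.inr hq, hh⟩
    · rintro (h | ⟨q, (rfl | hq), hh⟩)
      · exact Or.inl (Or.inl h)
      · exact Or.inl (Or.inr hh)
      · exact Or.inr ⟨q, hq, hh⟩

-- per-pawn equivalence: A's full-scan test = B's three-column dictionary test
theorem pvAnyW (bp : List (Int × Int)) (pr pc : Int) :
    (bp.any (fun b => decide (b.2 ≥ pc - 1) && decide (b.2 ≤ pc + 1) && decide (b.1 < pr)))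
    = ([pc - 1, pc, pc + 1].any (fun c => pvLtAt (bp.foldl pvStepMin PySem.Dict.empty) c pr)) := by
  rw [Bool.eq_iff_iff]
  simp only [List.any_eq_true, pvLtAt_foldl]
  constructor
  · rintro ⟨b, hb, h⟩
    simp only [Bool.and_eq_true, decide_eq_true_eq] at h
    refine ⟨b.2, by simp [List.mem_cons]; omega, Or.inr ⟨b, hb, rfl, h.2⟩⟩
  · rintro ⟨c, hc, h | ⟨q, hq, rfl, hlt⟩⟩
    · simp [pvLtAt, PySem.Dict.get?_empty] at h
    · simp only [List.mem_cons, List.not_mem_nil, or_false] at hc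
      exact ⟨q, hq, by simp only [Bool.and_eq_true, decide_eq_true_eq]; omega⟩

theorem pvAnyB (wp : List (Int × Int)) (pr pc : Int) :
    (wp.any (fun w => decide (w.2 ≥ pc - 1) && decide (w.2 ≤ pc + 1) && decide (w.1 > pr)))
    = ([pc - 1, pc, pc + 1].any (fun c => pvGtAt (wp.foldl pvStepMax PySem.Dict.empty) c pr)) := by
  rw [Bool.eq_iff_iff]
  simp only [List.any_eq_true, pvGtAt_foldl]
  constructor
  · rintro ⟨b, hb, h⟩
    simp only [Bool.and_eq_true, decide_eq_true_eq] at h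
    refine ⟨b.2, by simp [List.mem_cons]; omega, Or.inr ⟨b, hb, rfl, h.2⟩⟩
  · rintro ⟨c, hc, h | ⟨q, hq, rfl, hlt⟩⟩
    · simp [pvGtAt, PySem.Dict.get?_empty] at h
    · simp only [List.mem_cons, List.not_mem_nil, or_false] at hc
      exact ⟨q, hq, by simp only [Bool.and_eq_true, decide_eq_true_eq]; omega⟩

-- ===== VERDICT (by name: the statement is the Claim_ definition above) =====
theorem evaluate_passed_pawns_spec : Claim_equal_evaluate_passed_pawns := by
  intro gs wp bp _
  unfold Spec_evaluate_passed_pawns evaluate_passed_pawns evaluate_passed_pawns_alt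
  simp only []
  congr 1
  · funext s p; rw [pvAnyB wp p.1 p.2]
  · congr 1; funext s p; rw [pvAnyW bp p.1 p.2]
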